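-- pv_equiv track=rewrite | github.com/benrose258/Python | Python 2.7 Files/Classwork/CS 110/Practice exam 3 Document 2.py | helpfindmin
-- ===== SOURCE A (Python) =====
-- def helpfindmin(finalnumber,mylist):
--     if mylist == []:
--         return finalnumber
--     else:
--         if finalnumber>=mylist[0]:
--             finalnumber = mylist[0]
--             return helpfindmin(finalnumber,mylist[1:])
--         else:
--             return helpfindmin(finalnumber,mylist[1:])
-- ===== SOURCE B (Python) =====
-- def helpfindmin(finalnumber, mylist):
--     for x in mylist:
--         if x < finalnumber:
--             finalnumber = x
--     return finalnumber
-- ===== Notes on version B (the rewrite author's own statement) =====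
-- stated objective: faster
-- what changed: Replaced the recursion that rebuilds the tail with mylist[1:] at every step (quadratic copying, recursion-depth limited) with a single iterative pass keeping the running minimum.
import Mathlib
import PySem

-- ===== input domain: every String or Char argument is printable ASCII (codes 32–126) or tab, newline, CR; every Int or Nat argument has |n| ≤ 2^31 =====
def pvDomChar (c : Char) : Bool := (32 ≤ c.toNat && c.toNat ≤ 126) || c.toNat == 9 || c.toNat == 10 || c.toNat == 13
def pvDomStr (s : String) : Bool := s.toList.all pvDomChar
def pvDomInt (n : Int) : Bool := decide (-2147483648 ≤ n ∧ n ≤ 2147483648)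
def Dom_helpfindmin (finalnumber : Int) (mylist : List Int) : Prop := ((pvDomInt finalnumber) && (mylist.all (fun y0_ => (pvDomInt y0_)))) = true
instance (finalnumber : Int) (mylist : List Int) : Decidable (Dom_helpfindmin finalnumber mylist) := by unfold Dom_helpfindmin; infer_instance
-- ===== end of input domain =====

-- B: iterative single pass tracking the minimum instead of A's recursion on list tails (faster: no tail copies).


-- ===== PORT A =====
def helpfindmin (finalnumber : Int) (mylist : List Int) : Int :=
  match mylist with
  | [] => finalnumber
  | x :: rest =>
    if finalnumber ≥ x then
      helpfindmin x rest
    else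
      helpfindmin finalnumber rest

-- ===== PORT B =====
def helpfindmin_alt (finalnumber : Int) (mylist : List Int) : Int :=
  mylist.foldl (fun acc x => if x < acc then x else acc) finalnumber

-- ===== PRECONDITION & SPEC =====
def Spec_helpfindmin (finalnumber : Int) (mylist : List Int) (out : Int) : Prop := out = helpfindmin_alt finalnumber mylist
instance (finalnumber : Int) (mylist : List Int) (out : Int) : Decidable (Spec_helpfindmin finalnumber mylist out) := by unfold Spec_helpfindmin; infer_instance

-- ===== CLAIM (what is proved, stated in full; the proofs are below) =====
def Claim_equal_helpfindmin : Prop := ∀ (finalnumber : Int) (mylist : List Int), Dom_helpfindmin finalnumber mylist → Spec_helpfindmin finalnumber mylist (helpfindmin finalnumber mylist)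

-- ===== LEMMAS AND PROOFS =====

-- ===== VERDICT (by name: the statement is the Claim_ definition above) =====
theorem helpfindmin_ext (mylist : List Int) : ∀ finalnumber : Int,
    helpfindmin finalnumber mylist = helpfindmin_alt finalnumber mylist := by
  induction mylist with
  | nil => intro fn; simp [helpfindmin, helpfindmin_alt]
  | cons x rest ih =>
    intro fn
    simp only [helpfindmin, helpfindmin_alt, List.foldl]
    by_cases h : x < fn
    · rw [if_pos (by omega : fn ≥ x), if_pos h, ih]; rfl
    · rw [if_neg h]
      by_cases h2 : fn ≥ x
      · have hx : x = fn := by omega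
        subst hx; rw [if_pos h2, ih]; rfl
      · rw [if_neg h2, ih]; rfl

theorem helpfindmin_spec : Claim_equal_helpfindmin := by
  intro fn l _
  unfold Spec_helpfindmin
  exact helpfindmin_ext l fn
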